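-- pv_equiv track=rewrite | github.com/DeLyXHardiee/GNN-Campaign-Detection | core/featureNormalization/featureNormalizationTREC.py | parse_misp_event_attributes
-- ===== SOURCE A (Python) =====
-- def parse_misp_event_attributes(event):
--     """
--     Parse MISP event attributes into normalized email field dictionary.
--
--     Returns:
--         Dict with keys: subject, body, sender, receiver, date, etc.
--     """
--     email_fields = {
--         'subject': '',
--         'body': '',
--         'sender': '',
--         'receiver': '',
--         'date': ''
--     }
--     attributes = event.get('Attribute', [])
--     for attr in attributes:
--         attr_type = attr.get('type', '')
--         attr_value = attr.get('value', '')
--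
--         # Map MISP attribute types to email fields
--         if attr_type == 'email-subject':
--             email_fields['subject'] = attr_value
--         elif attr_type == 'email-body':
--             email_fields['body'] = attr_value
--         elif attr_type == 'email-src':
--             email_fields['sender'] = attr_value
--         elif attr_type == 'email-dst':
--             email_fields['receiver'] = attr_value
--         elif attr_type == 'email-date':
--             email_fields['date'] = attr_value
--
--     return email_fields
-- ===== SOURCE B (Python) =====
-- def parse_misp_event_attributes(event):
--     """
--     Parse MISP event attributes into normalized email field dictionary.
--
--     Returns:
--         Dict with keys: subject, body, sender, receiver, date, etc.
--     """
--     attributes = event.get('Attribute', [])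
--     rev = list(reversed(attributes))
--
--     def last_value(wanted_type):
--         # last occurrence wins = first match scanning backwards
--         for attr in rev:
--             if attr.get('type', '') == wanted_type:
--                 return attr.get('value', '')
--         return ''
--
--     return {
--         'subject': last_value('email-subject'),
--         'body': last_value('email-body'),
--         'sender': last_value('email-src'),
--         'receiver': last_value('email-dst'),
--         'date': last_value('email-date'),
--     }
-- ===== Notes on version B (the rewrite author's own statement) =====
-- stated objective: alternative
-- what changed: Instead of A's single forward pass that mutates a result dict through an if/elif chain, B reverses the attribute list once and answers each of the five fields by an independent backward first-match search (first match in the reversed list = last writer in A), never maintaining an accumulator dict.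
import Mathlib
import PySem

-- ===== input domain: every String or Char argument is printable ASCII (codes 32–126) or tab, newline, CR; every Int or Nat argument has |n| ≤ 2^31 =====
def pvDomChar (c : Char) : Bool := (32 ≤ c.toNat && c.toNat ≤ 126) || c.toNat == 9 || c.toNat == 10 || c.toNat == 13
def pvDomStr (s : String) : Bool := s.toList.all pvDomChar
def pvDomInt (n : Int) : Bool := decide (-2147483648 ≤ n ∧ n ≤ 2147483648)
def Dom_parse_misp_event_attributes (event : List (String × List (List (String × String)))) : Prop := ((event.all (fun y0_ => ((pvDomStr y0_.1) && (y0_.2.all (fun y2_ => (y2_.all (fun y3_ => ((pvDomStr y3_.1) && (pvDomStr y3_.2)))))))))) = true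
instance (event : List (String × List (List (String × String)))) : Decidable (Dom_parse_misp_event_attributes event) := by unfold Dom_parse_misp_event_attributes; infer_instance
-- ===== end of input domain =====

-- B answers each of the five fields by an independent backward first-match search over the
-- reversed attribute list instead of A's single forward dict-mutating pass; alternative, same cost.


-- ===== PORT A =====
-- one iteration of A's for-loop: if/elif chain mutating the email_fields dict
def pvStepA (ef : PySem.Dict String String) (attr : List (String × String)) : PySem.Dict String String :=
  let attr_type := (PySem.Dict.mk attr).getD "type" ""
  let attr_value := (PySem.Dict.mk attr).getD "value" ""
  if attr_type == "email-subject" then ef.insert "subject" attr_value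
  else if attr_type == "email-body" then ef.insert "body" attr_value
  else if attr_type == "email-src" then ef.insert "sender" attr_value
  else if attr_type == "email-dst" then ef.insert "receiver" attr_value
  else if attr_type == "email-date" then ef.insert "date" attr_value
  else ef

def parse_misp_event_attributes (event : List (String × List (List (String × String)))) : List (String × String) :=
  let email_fields : PySem.Dict String String :=
    PySem.Dict.mk [("subject", ""), ("body", ""), ("sender", ""), ("receiver", ""), ("date", "")]
  let attributes := (PySem.Dict.mk event).getD "Attribute" []
  (attributes.foldl pvStepA email_fields).items

-- ===== PORT B =====
-- B's last_value helper: first match scanning the (already reversed) list, '' if none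
def pvLastValue (rev : List (List (String × String))) (wanted_type : String) : String :=
  match rev with
  | [] => ""
  | attr :: rest =>
    if (PySem.Dict.mk attr).getD "type" "" == wanted_type
    then (PySem.Dict.mk attr).getD "value" ""
    else pvLastValue rest wanted_type

def parse_misp_event_attributes_alt (event : List (String × List (List (String × String)))) : List (String × String) :=
  let attributes := (PySem.Dict.mk event).getD "Attribute" []
  let rev := attributes.reverse
  [("subject", pvLastValue rev "email-subject"),
   ("body", pvLastValue rev "email-body"),
   ("sender", pvLastValue rev "email-src"),
   ("receiver", pvLastValue rev "email-dst"),
   ("date", pvLastValue rev "email-date")]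

-- ===== PRECONDITION & SPEC =====
def Spec_parse_misp_event_attributes (event : List (String × List (List (String × String)))) (out : List (String × String)) : Prop := out = parse_misp_event_attributes_alt event
instance (event : List (String × List (List (String × String)))) (out : List (String × String)) : Decidable (Spec_parse_misp_event_attributes event out) := by unfold Spec_parse_misp_event_attributes; infer_instance

-- ===== CLAIM =====
def Claim_equal_parse_misp_event_attributes : Prop := ∀ (event : List (String × List (List (String × String)))), Dom_parse_misp_event_attributes event → Spec_parse_misp_event_attributes event (parse_misp_event_attributes event)

-- ===== LEMMAS AND PROOFS =====

-- backward first-match with an explicit default (proof device for the fold correspondence)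
def pvLastValueD (rev : List (List (String × String))) (t d : String) : String :=
  match rev with
  | [] => d
  | attr :: rest =>
    if (PySem.Dict.mk attr).getD "type" "" == t
    then (PySem.Dict.mk attr).getD "value" ""
    else pvLastValueD rest t d

lemma pvLastValue_eq_D (rev : List (List (String × String))) (t : String) :
    pvLastValue rev t = pvLastValueD rev t "" := by
  induction rev with
  | nil => rfl
  | cons a rest ih => simp only [pvLastValue, pvLastValueD, ih]

lemma pvLastValueD_append_singleton (xs : List (List (String × String)))
    (a : List (String × String)) (t d : String) :
    pvLastValueD (xs ++ [a]) t d
      = pvLastValueD xs t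
          (if (PySem.Dict.mk a).getD "type" "" == t then (PySem.Dict.mk a).getD "value" "" else d) := by
  induction xs with
  | nil => rfl
  | cons x rest ih => simp only [List.cons_append, pvLastValueD, ih]

-- the dict A's loop maintains, as a function of the five current field values
def pvFive (s b sn r dt : String) : PySem.Dict String String :=
  PySem.Dict.mk [("subject", s), ("body", b), ("sender", sn), ("receiver", r), ("date", dt)]

def pvUpd (t : String) (attr : List (String × String)) (old : String) : String :=
  if (PySem.Dict.mk attr).getD "type" "" == t then (PySem.Dict.mk attr).getD "value" "" else old

lemma pvStepA_five (s b sn r dt : String) (attr : List (String × String)) :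
    pvStepA (pvFive s b sn r dt) attr
      = pvFive (pvUpd "email-subject" attr s) (pvUpd "email-body" attr b)
               (pvUpd "email-src" attr sn) (pvUpd "email-dst" attr r)
               (pvUpd "email-date" attr dt) := by
  unfold pvStepA pvUpd pvFive
  generalize (PySem.Dict.mk attr).getD "type" "" = t
  generalize (PySem.Dict.mk attr).getD "value" "" = v
  by_cases h1 : t = "email-subject"
  · subst h1; simp [PySem.Dict.insert]
  · by_cases h2 : t = "email-body"
    · subst h2; simp [PySem.Dict.insert]
    · by_cases h3 : t = "email-src"
      · subst h3; simp [PySem.Dict.insert]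
      · by_cases h4 : t = "email-dst"
        · subst h4; simp [PySem.Dict.insert]
        · by_cases h5 : t = "email-date"
          · subst h5; simp [PySem.Dict.insert]
          · simp [h1, h2, h3, h4, h5]

lemma pvFoldA_five (attrs : List (List (String × String))) (s b sn r dt : String) :
    attrs.foldl pvStepA (pvFive s b sn r dt)
      = pvFive (pvLastValueD attrs.reverse "email-subject" s)
               (pvLastValueD attrs.reverse "email-body" b)
               (pvLastValueD attrs.reverse "email-src" sn)
               (pvLastValueD attrs.reverse "email-dst" r)
               (pvLastValueD attrs.reverse "email-date" dt) := by
  induction attrs generalizing s b sn r dt with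
  | nil => rfl
  | cons a rest ih =>
    simp only [List.foldl_cons, pvStepA_five, ih, List.reverse_cons,
      pvLastValueD_append_singleton]
    rfl

-- ===== VERDICT =====
theorem parse_misp_event_attributes_spec : Claim_equal_parse_misp_event_attributes := by
  intro event _
  show parse_misp_event_attributes event = parse_misp_event_attributes_alt event
  unfold parse_misp_event_attributes parse_misp_event_attributes_alt
  have h : PySem.Dict.mk [("subject", ""), ("body", ""), ("sender", ""), ("receiver", ""), ("date", "")]
      = pvFive "" "" "" "" "" := rfl
  simp only [h, pvFoldA_five, pvLastValue_eq_D]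
  rfl
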